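-- pv_equiv track=rewrite | github.com/SakshamG7/E-LeetCode | Weekly/470/Q4.py | old
-- ===== SOURCE A (Python) =====
-- def contains_zeros(n: int) -> bool:
--         if n == 0:
--             return True
--         while n > 0:
--             if n % 10 == 0:
--                 return True
--             n //= 10
--         return False
--
-- def old(n):
--     l = 0
--     n1 = n - 1
--     n2 = 1
--     for i in range(n//2):
--         if not (contains_zeros(n1) or contains_zeros(n2)):
--             l += 2
--             if n1 == n2:
--                 l -= 1
--         n1 -= 1
--         n2 += 1
--     return l
-- ===== SOURCE B (Python) =====
-- def zerofree(m: int) -> bool: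
--     return m % 10 != 0 and (m < 10 or zerofree(m // 10))
--
-- def old(n):
--     return sum(1 for a in range(1, n) if zerofree(a) and zerofree(n - a))
-- ===== Notes on version B (the rewrite author's own statement) =====
-- stated objective: simpler
-- what changed: A walks only the lower half of the range with two mirrored counters, double-counting each zero-free split and correcting the middle point; B is a plain single pass over every proper split a + (n - a) of n, counting each once, with the digit test written as a short recursion instead of a while loop.
import Mathlib
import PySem

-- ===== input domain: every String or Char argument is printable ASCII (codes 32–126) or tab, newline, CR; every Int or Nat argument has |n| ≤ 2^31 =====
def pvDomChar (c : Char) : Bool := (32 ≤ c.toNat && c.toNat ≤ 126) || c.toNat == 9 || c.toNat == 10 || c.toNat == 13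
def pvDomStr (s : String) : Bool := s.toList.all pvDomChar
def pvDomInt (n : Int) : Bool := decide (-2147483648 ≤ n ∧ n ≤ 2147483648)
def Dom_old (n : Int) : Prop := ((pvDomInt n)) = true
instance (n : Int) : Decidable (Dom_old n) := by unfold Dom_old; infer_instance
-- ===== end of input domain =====

-- B replaces A's mirrored half-range loop (two counters, +2 with a middle-point correction)
-- by a plain single pass over a = 1..n-1 counting each zero-free pair once (objective: simpler).

-- ===== PORT A =====
-- while n > 0: if n % 10 == 0: return True; n //= 10
def czLoop (n : Int) : Bool :=
  if _h : 0 < n then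
    if PySem.Int.mod n 10 == 0 then true
    else czLoop (PySem.Int.floordiv n 10)
  else false
termination_by n.toNat
decreasing_by
  rw [PySem.Int.floordiv_eq_ediv_of_pos (by norm_num)]
  omega

def containsZeros (n : Int) : Bool :=
  if n == 0 then true else czLoop n

def old (n : Int) : Int :=
  ((PySem.List.pyRange 0 (PySem.Int.floordiv n 2) 1).foldl
    (fun (s : Int × Int × Int) _ =>
      let l := s.1
      let n1 := s.2.1
      let n2 := s.2.2
      let l := if !(containsZeros n1 || containsZeros n2) then
                 (if n1 == n2 then l + 2 - 1 else l + 2)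
               else l
      (l, n1 - 1, n2 + 1))
    (0, n - 1, 1)).1

-- ===== PORT B =====
-- return m % 10 != 0 and (m < 10 or zerofree(m // 10))
def zeroFree (m : Int) : Bool :=
  if PySem.Int.mod m 10 == 0 then false
  else if m < 10 then true
  else zeroFree (PySem.Int.floordiv m 10)
termination_by m.toNat
decreasing_by
  rw [PySem.Int.floordiv_eq_ediv_of_pos (by norm_num)]
  omega

def old_alt (n : Int) : Int :=
  (PySem.List.pyRange 1 n 1).foldl
    (fun acc a => if zeroFree a && zeroFree (n - a) then acc + 1 else acc) 0

-- ===== PRECONDITION & SPEC =====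
def Spec_old (n : Int) (out : Int) : Prop := out = old_alt n
instance (n : Int) (out : Int) : Decidable (Spec_old n out) := by unfold Spec_old; infer_instance

-- ===== CLAIM (what is proved, stated in full; the proofs are below) =====
def Claim_equal_old : Prop := ∀ (n : Int), Dom_old n → Spec_old n (old n)

-- ===== LEMMAS AND PROOFS =====

-- A's zero-digit test is the negation of B's zero-free test on positive integers.
theorem cz_eq_not_zf (m : Int) (hm : 0 < m) : containsZeros m = !zeroFree m := by
  have hm0 : ¬ (m == 0) = true := by simp; omega
  rw [containsZeros, if_neg hm0, czLoop, zeroFree, dif_pos hm]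
  by_cases h0 : (PySem.Int.mod m 10 == 0) = true
  · rw [if_pos h0, if_pos h0]; rfl
  · rw [if_neg h0, if_neg h0]
    by_cases hlt : m < 10
    · rw [if_pos hlt]
      have hz : PySem.Int.floordiv m 10 = 0 := by
        rw [PySem.Int.floordiv_eq_ediv_of_pos (by norm_num)]; omega
      rw [hz, czLoop, dif_neg (by omega : ¬ (0 : Int) < 0)]; rfl
    · rw [if_neg hlt]
      have hpos : 0 < PySem.Int.floordiv m 10 := by
        rw [PySem.Int.floordiv_eq_ediv_of_pos (by norm_num)]; omega
      have hrec := cz_eq_not_zf (PySem.Int.floordiv m 10) hpos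
      have hne : ¬ (PySem.Int.floordiv m 10 == 0) = true := by simp; omega
      rw [containsZeros, if_neg hne] at hrec
      exact hrec
termination_by m.toNat
decreasing_by
  rw [PySem.Int.floordiv_eq_ediv_of_pos (by norm_num)]
  omega

-- B's indicator for a single value a
def Ind (n a : Int) : Int := if zeroFree a && zeroFree (n - a) then 1 else 0

theorem Ind_symm (n a : Int) : Ind n a = Ind n (n - a) := by
  unfold Ind
  rw [show n - (n - a) = a by ring, Bool.and_comm]

-- A's per-iteration contribution, and its loop step as a named function (definitionally
-- equal to the lambda in `old`)
def gA (x y : Int) : Int :=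
  if !(containsZeros x || containsZeros y) then (if x == y then 1 else 2) else 0

def stepA : Int × Int × Int → Int → Int × Int × Int := fun s _ =>
  let l := s.1
  let n1 := s.2.1
  let n2 := s.2.2
  let l := if !(containsZeros n1 || containsZeros n2) then
             (if n1 == n2 then l + 2 - 1 else l + 2)
           else l
  (l, n1 - 1, n2 + 1)

theorem stepA_eq (l n1 n2 x : Int) :
    stepA (l, n1, n2) x = (l + gA n1 n2, n1 - 1, n2 + 1) := by
  simp only [stepA, gA]
  split_ifs <;> simp
  omega

-- A's loop invariant: the first component after the fold is the running sum of gA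
theorem loopA (xs : List Int) : ∀ (l n1 n2 : Int),
    ((xs.foldl stepA (l, n1, n2)).1)
    = l + ∑ i ∈ Finset.range xs.length, gA (n1 - (i : Int)) (n2 + (i : Int)) := by
  induction xs with
  | nil => intro l n1 n2; simp
  | cons x xs ih =>
    intro l n1 n2
    rw [List.foldl_cons, stepA_eq, ih (l + gA n1 n2) (n1 - 1) (n2 + 1)]
    have harg : ∀ i ∈ Finset.range xs.length, gA (n1 - 1 - (i : Int)) (n2 + 1 + (i : Int))
        = gA (n1 - ((i + 1 : Nat) : Int)) (n2 + ((i + 1 : Nat) : Int)) := by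
      intro i _; congr 1 <;> push_cast <;> ring
    rw [Finset.sum_congr rfl harg, List.length_cons, Finset.sum_range_succ']
    simp only [Nat.cast_zero, sub_zero, add_zero]
    ring

-- B's loop step as a named function (definitionally equal to the lambda in `old_alt`)
def stepB (n : Int) : Int → Int → Int :=
  fun acc a => if zeroFree a && zeroFree (n - a) then acc + 1 else acc

-- B's loop: folding over range(1, 1+k) sums the indicators
theorem loopB (n : Int) : ∀ (k : Nat) (acc : Int),
    ((PySem.List.pyRange 1 (1 + (k : Int)) 1).foldl (stepB n) acc)
    = acc + ∑ i ∈ Finset.range k, Ind n (1 + (i : Int)) := by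
  intro k
  induction k with
  | zero => intro acc; simp [PySem.List.pyRange_one_eq_nil]
  | succ k ih =>
    intro acc
    have hsplit : PySem.List.pyRange 1 (1 + ((k : Nat) + 1 : Nat) : Int) 1
        = PySem.List.pyRange 1 (1 + (k : Int)) 1 ++ [1 + (k : Int)] := by
      have h := PySem.List.pyRange_one_succ_right (a := 1) (b := 1 + (k : Int)) (by omega)
      rw [show (1 + ((k : Nat) + 1 : Nat) : Int) = 1 + (k : Int) + 1 by push_cast; ring]
      exact h
    rw [hsplit, List.foldl_append, ih acc, Finset.sum_range_succ]
    show stepB n _ _ = _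
    rw [stepB]
    by_cases hc : (zeroFree (1 + (k : Int)) && zeroFree (n - (1 + (k : Int)))) = true
    · rw [if_pos hc, show Ind n (1 + (k : Int)) = 1 from by rw [Ind, if_pos hc]]
      ring
    · rw [if_neg hc, show Ind n (1 + (k : Int)) = 0 from by rw [Ind, if_neg hc]]
      ring

theorem old_eq_alt (n : Int) : old n = old_alt n := by
  by_cases hn : n ≤ 1
  · -- both loops are empty
    have h2 : PySem.Int.floordiv n 2 ≤ 0 := by
      rw [PySem.Int.floordiv_eq_ediv_of_pos (by norm_num)]; omega
    rw [old, old_alt, PySem.List.pyRange_one_eq_nil (by omega),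
        PySem.List.pyRange_one_eq_nil (by omega)]
    rfl
  · obtain ⟨N, rfl⟩ : ∃ N : Nat, n = (N : Int) := ⟨n.toNat, by omega⟩
    have hN : 2 ≤ N := by omega
    have hfd : PySem.Int.floordiv (N : Int) 2 = ((N / 2 : Nat) : Int) := by
      rw [PySem.Int.floordiv_eq_ediv_of_pos (by norm_num)]
      omega
    set H : Nat := N / 2 with hH
    have hlen : (PySem.List.pyRange 0 (PySem.Int.floordiv (N : Int) 2) 1).length = H := by
      rw [PySem.List.length_pyRange_one, hfd]; omega
    -- A's side: sum of gA over the H iterations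
    have hA : old (N : Int)
        = ∑ i ∈ Finset.range H, gA ((N : Int) - 1 - (i : Int)) (1 + (i : Int)) := by
      have hdef : old (N : Int)
          = ((PySem.List.pyRange 0 (PySem.Int.floordiv (N : Int) 2) 1).foldl stepA
              (0, (N : Int) - 1, 1)).1 := rfl
      rw [hdef, loopA, hlen]
      ring
    -- B's side: sum of Ind over the N-1 values
    have hB : old_alt (N : Int)
        = ∑ i ∈ Finset.range (N - 1), Ind (N : Int) (1 + (i : Int)) := by
      have hdef : old_alt (N : Int)
          = (PySem.List.pyRange 1 (N : Int) 1).foldl (stepB (N : Int)) 0 := rfl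
      rw [hdef, show ((N : Int)) = 1 + ((N - 1 : Nat) : Int) by omega, loopB]
      ring
    -- rewrite A's terms through B's indicator
    have hterm : ∀ i ∈ Finset.range H,
        gA ((N : Int) - 1 - (i : Int)) (1 + (i : Int))
        = 2 * Ind (N : Int) (1 + (i : Int))
          - (if (N : Int) = 2 * ((i : Int) + 1) then Ind (N : Int) (1 + (i : Int)) else 0) := by
      intro i hi
      have hiH : i < H := Finset.mem_range.mp hi
      have h1 : 0 < (N : Int) - 1 - (i : Int) := by omega
      have h2 : 0 < 1 + (i : Int) := by omega
      rw [gA, Ind, cz_eq_not_zf _ h1, cz_eq_not_zf _ h2,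
          show (N : Int) - (1 + (i : Int)) = (N : Int) - 1 - (i : Int) by ring]
      have heq : (((N : Int) - 1 - (i : Int)) == (1 + (i : Int)))
          = decide ((N : Int) = 2 * ((i : Int) + 1)) := by
        rw [beq_eq_decide]
        simp only [decide_eq_decide]
        omega
      rw [heq]
      cases hz1 : zeroFree ((N : Int) - 1 - (i : Int)) <;>
        cases hz2 : zeroFree (1 + (i : Int)) <;>
          by_cases hd : (N : Int) = 2 * ((i : Int) + 1) <;>
            simp [hd]
    rw [hA, hB, Finset.sum_congr rfl hterm, Finset.sum_sub_distrib]
    -- split B's range at H : (N - 1) = H + m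
    set m : Nat := N - 1 - H with hm
    have hNm : N - 1 = H + m := by omega
    rw [hNm, Finset.sum_range_add]
    -- reflect the upper half of B's range onto the lower half via the symmetry of Ind
    have hrefl : ∀ j ∈ Finset.range m,
        Ind (N : Int) (1 + ((H + j : Nat) : Int)) = Ind (N : Int) (1 + ((m - 1 - j : Nat) : Int)) := by
      intro j hj
      have hjm : j < m := Finset.mem_range.mp hj
      rw [Ind_symm]
      congr 1
      push_cast [Nat.cast_sub (by omega : 1 + j ≤ m)]
      omega
    rw [Finset.sum_congr rfl hrefl,
        Finset.sum_range_reflect (fun j => Ind (N : Int) (1 + (j : Int))) m]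
    by_cases hpar : N % 2 = 0
    · -- N even: m = H - 1 and the diagonal correction removes the double-counted middle term
      obtain ⟨K, hK⟩ : ∃ K, H = K + 1 := ⟨H - 1, by omega⟩
      have hmK : m = K := by omega
      have hdiag : ∀ i ∈ Finset.range H,
          (if (N : Int) = 2 * ((i : Int) + 1) then Ind (N : Int) (1 + (i : Int)) else 0)
          = (if i = K then Ind (N : Int) (1 + (i : Int)) else 0) := by
        intro i hi
        have hiH : i < H := Finset.mem_range.mp hi
        have hiff : ((N : Int) = 2 * ((i : Int) + 1)) ↔ (i = K) := by omega
        simp only [hiff]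
      rw [Finset.sum_congr rfl hdiag,
          Finset.sum_ite_eq' (Finset.range H) K (fun i => Ind (N : Int) (1 + (i : Int))),
          if_pos (Finset.mem_range.mpr (by omega)), hmK, hK,
          Finset.sum_range_succ (fun i => 2 * Ind (N : Int) (1 + (i : Int))) K,
          Finset.sum_range_succ (fun i => Ind (N : Int) (1 + (i : Int))) K]
      rw [← Finset.mul_sum]
      ring
    · -- N odd: m = H and the diagonal condition never holds
      have hmH : m = H := by omega
      have hdiag : ∀ i ∈ Finset.range H,
          (if (N : Int) = 2 * ((i : Int) + 1) then Ind (N : Int) (1 + (i : Int)) else 0) = 0 := by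
        intro i hi
        have hne : ¬ ((N : Int) = 2 * ((i : Int) + 1)) := by omega
        rw [if_neg hne]
      rw [Finset.sum_congr rfl hdiag, Finset.sum_const_zero, hmH]
      rw [show (∑ i ∈ Finset.range H, 2 * Ind (N : Int) (1 + (i : Int)))
            = 2 * ∑ i ∈ Finset.range H, Ind (N : Int) (1 + (i : Int)) from (Finset.mul_sum _ _ _).symm]
      ring

-- ===== VERDICT (by name: the statement is the Claim_ definition above) =====
theorem old_spec : Claim_equal_old := by
  intro n _
  unfold Spec_old
  exact old_eq_alt n
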